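-- pv_equiv track=rewrite | github.com/Louis-DR/j2gpp | j2gpp/filters.py | int_to_duodecimal
-- ===== SOURCE A (Python) =====
-- def int_to_duodecimal(value, length=0, ten='a', eleven='b'):
--   digits = []
--   while value > 0:
--     remainder = value % 12
--     if remainder < 10:
--       digits.append(str(remainder))
--     elif remainder == 10:
--       digits.append(ten)
--     else:
--       digits.append(eleven)
--     value //= 12
--   if not digits:
--     digits.append('0')
--   duodecimal_string = ''.join(reversed(digits))
--   return duodecimal_string.rjust(length, '0')
-- ===== SOURCE B (Python) =====
-- def int_to_duodecimal(value, length=0, ten='a', eleven='b'):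
--   def digit(r):
--     return str(r) if r < 10 else (ten if r == 10 else eleven)
--   def rec(v):
--     return '' if v <= 0 else rec(v // 12) + digit(v % 12)
--   s = rec(value) if value > 0 else '0'
--   return s.rjust(length, '0')
-- ===== Notes on version B (the rewrite author's own statement) =====
-- stated objective: simpler
-- what changed: Replaces the iterative least-significant-digit loop that appends to a list and then reverses-and-joins with a direct recursion that emits digits most-significant first by string concatenation, so no list, no reversal and no join are needed.
import Mathlib
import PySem

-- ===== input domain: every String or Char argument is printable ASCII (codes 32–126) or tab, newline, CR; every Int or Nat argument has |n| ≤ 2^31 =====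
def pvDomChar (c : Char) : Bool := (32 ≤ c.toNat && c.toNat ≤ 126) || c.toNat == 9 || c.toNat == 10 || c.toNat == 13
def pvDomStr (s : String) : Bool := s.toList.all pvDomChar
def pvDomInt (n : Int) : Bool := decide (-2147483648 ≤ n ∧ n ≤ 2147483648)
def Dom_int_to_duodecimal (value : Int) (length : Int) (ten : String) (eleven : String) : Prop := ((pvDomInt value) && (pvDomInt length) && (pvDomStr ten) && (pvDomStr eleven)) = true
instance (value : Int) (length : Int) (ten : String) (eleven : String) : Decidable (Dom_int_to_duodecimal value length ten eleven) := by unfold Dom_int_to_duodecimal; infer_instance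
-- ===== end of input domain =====

-- B replaces A's least-significant-first loop (list append, then reverse and join)
-- by a direct most-significant-first recursion via string concatenation; objective: simpler.

-- s.rjust(w, fill): left-pad with fill up to width w (exact for Int w: no pad when w ≤ len)
def pvRjust (s : String) (w : Int) (fill : Char) : String :=
  String.ofList (List.replicate (w.toNat - s.toList.length) fill ++ s.toList)

-- ===== PORT A =====
-- the while-loop of A: state is (value, digits); appends the digit string for value % 12
def pvLoopA (v : Int) (ten eleven : String) (digits : List String) : List String :=
  if _hv : 0 < v then
    let r := PySem.Int.mod v 12
    let d := if r < 10 then PySem.Int.toStr r else if r = 10 then ten else eleven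
    pvLoopA (PySem.Int.floordiv v 12) ten eleven (digits ++ [d])
  else digits
termination_by v.toNat
decreasing_by
  rw [PySem.Int.floordiv_eq_ediv_of_pos (by norm_num : (0:Int) < 12)]
  omega

def int_to_duodecimal (value : Int) (length : Int) (ten : String) (eleven : String) : String :=
  let digits := pvLoopA value ten eleven []
  let digits := if digits = [] then digits ++ ["0"] else digits
  let duodecimal_string := PySem.Str.join "" digits.reverse
  pvRjust duodecimal_string length '0'

-- ===== PORT B =====
-- B's rec(v): '' if v <= 0 else rec(v // 12) + digit(v % 12); Python string concatenation
-- is ported exactly as List Char append (String.ofList at the end)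
def pvRecB (v : Int) (ten eleven : String) : List Char :=
  if _hv : v ≤ 0 then []
  else
    pvRecB (PySem.Int.floordiv v 12) ten eleven ++
      (let r := PySem.Int.mod v 12
       if r < 10 then (PySem.Int.toStr r).toList
       else if r = 10 then ten.toList else eleven.toList)
termination_by v.toNat
decreasing_by
  rw [PySem.Int.floordiv_eq_ediv_of_pos (by norm_num : (0:Int) < 12)]
  omega

def int_to_duodecimal_alt (value : Int) (length : Int) (ten : String) (eleven : String) : String :=
  let s := if 0 < value then String.ofList (pvRecB value ten eleven) else "0"
  pvRjust s length '0'

-- ===== PRECONDITION & SPEC =====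
def Spec_int_to_duodecimal (value : Int) (length : Int) (ten : String) (eleven : String) (out : String) : Prop := out = int_to_duodecimal_alt value length ten eleven
instance (value : Int) (length : Int) (ten : String) (eleven : String) (out : String) : Decidable (Spec_int_to_duodecimal value length ten eleven out) := by unfold Spec_int_to_duodecimal; infer_instance

-- ===== CLAIM (what is proved, stated in full; the proofs are below) =====
def Claim_equal_int_to_duodecimal : Prop := ∀ (value : Int) (length : Int) (ten : String) (eleven : String), Dom_int_to_duodecimal value length ten eleven → Spec_int_to_duodecimal value length ten eleven (int_to_duodecimal value length ten eleven)

-- ===== LEMMAS AND PROOFS =====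

lemma pvJoin_empty_sep (parts : List (List Char)) :
    PySem.Chars.join [] parts = parts.flatten := by
  induction parts with
  | nil => simp [PySem.Chars.join_nil]
  | cons p rest ih =>
    cases rest with
    | nil => simp [PySem.Chars.join_singleton]
    | cons q r => simp [PySem.Chars.join_cons_cons, ih]

lemma pvRjust_congr {s t : String} (h : s.toList = t.toList) (w : Int) (fill : Char) :
    pvRjust s w fill = pvRjust t w fill := by
  simp [pvRjust, h]

-- A's loop, flattened in reverse, is B's recursion (plus the flattened accumulator)
lemma pvLoopA_flatten (n : Nat) :
    ∀ (v : Int), v.toNat ≤ n → ∀ (ten eleven : String) (acc : List String),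
      (((pvLoopA v ten eleven acc).reverse).map String.toList).flatten
        = pvRecB v ten eleven ++ ((acc.reverse).map String.toList).flatten := by
  induction n with
  | zero =>
    intro v hv ten eleven acc
    rw [pvLoopA, pvRecB]
    have h0 : ¬ 0 < v := by omega
    have hle : v ≤ 0 := by omega
    simp [h0, hle]
  | succ n ih =>
    intro v hv ten eleven acc
    rw [pvLoopA, pvRecB]
    by_cases h0 : 0 < v
    · have hfd : PySem.Int.floordiv v 12 = v / 12 :=
        PySem.Int.floordiv_eq_ediv_of_pos (by norm_num)
      have hle : (PySem.Int.floordiv v 12).toNat ≤ n := by rw [hfd]; omega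
      simp only [h0, dif_pos, show ¬ v ≤ 0 by omega, dif_neg, not_false_iff]
      rw [ih _ hle]
      simp only [List.reverse_append, List.reverse_cons, List.reverse_nil, List.nil_append,
        List.map_cons, List.map_append, List.flatten_cons, List.flatten_append, List.append_assoc]
      congr 1
      split_ifs <;> simp [PySem.Int.toList_toStr]
    · simp [h0, show v ≤ 0 by omega]

lemma pvLoopA_nonpos (v : Int) (hv : ¬ 0 < v) (ten eleven : String) (acc : List String) :
    pvLoopA v ten eleven acc = acc := by
  rw [pvLoopA]; simp [hv]

lemma pvLoopA_ne_nil (v : Int) (hv : 0 < v) (ten eleven : String) (acc : List String)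
    (hacc : acc ≠ []) : pvLoopA v ten eleven acc ≠ [] := by
  have h : ∀ n : Nat, ∀ v : Int, v.toNat ≤ n → 0 < v → ∀ acc : List String, acc ≠ [] →
      pvLoopA v ten eleven acc ≠ [] := by
    intro n
    induction n with
    | zero => intro v hv h0; omega
    | succ n ih =>
      intro v hv h0 acc hacc
      rw [pvLoopA]
      simp only [h0, dif_pos]
      by_cases h1 : 0 < PySem.Int.floordiv v 12
      · have hfd : PySem.Int.floordiv v 12 = v / 12 :=
          PySem.Int.floordiv_eq_ediv_of_pos (by norm_num)
        exact ih _ (by rw [hfd]; omega) h1 _ (by simp)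
      · rw [pvLoopA_nonpos _ h1]; simp
  exact h (v.toNat + 1) v (by omega) hv acc hacc

-- ===== VERDICT (by name: the statement is the Claim_ definition above) =====
theorem int_to_duodecimal_spec : Claim_equal_int_to_duodecimal := by
  intro value length ten eleven _
  show int_to_duodecimal value length ten eleven = int_to_duodecimal_alt value length ten eleven
  unfold int_to_duodecimal int_to_duodecimal_alt
  by_cases hv : 0 < value
  · -- loop runs: digits nonempty, joined reversed digits = B's recursion
    have hne : pvLoopA value ten eleven [] ≠ [] := by
      rw [pvLoopA]
      simp only [hv, dif_pos]
      by_cases h1 : 0 < PySem.Int.floordiv value 12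
      · exact pvLoopA_ne_nil _ h1 _ _ _ (by simp)
      · rw [pvLoopA_nonpos _ h1]; simp
    simp only [hv, if_pos, hne, if_neg, not_false_iff]
    apply pvRjust_congr
    rw [PySem.Str.toList_join]
    show PySem.Chars.join (String.toList "") _ = _
    have hsep : String.toList "" = [] := rfl
    rw [hsep, pvJoin_empty_sep]
    have := pvLoopA_flatten value.toNat value (le_refl _) ten eleven []
    simpa using this
  · -- value ≤ 0: A's digits = ["0"], B's s = "0"
    rw [pvLoopA_nonpos _ hv]
    simp only [hv, if_neg, not_false_iff, if_pos]
    apply pvRjust_congr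
    rfl
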